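-- pv_equiv track=rewrite | github.com/Asmah-Acheampong/TradingViewMCPServer | tradingview_mcp/pine_script/autocomplete.py | _extract_current_word
-- ===== SOURCE A (Python) =====
-- def _extract_current_word(code: str, cursor_position: int) -> str:
--     """Extract the word currently being typed"""
--     # Bounds checking
--     if not code or cursor_position > len(code):
--         return ""
--
--     cursor_position = min(cursor_position, len(code))
--     start = cursor_position
--
--     # Find start of word
--     while start > 0 and start <= len(code) and (code[start - 1].isalnum() or code[start - 1] in '_.'):
--         start -= 1
--
--     return code[start:cursor_position].lower()
-- ===== SOURCE B (Python) =====
-- def _extract_current_word(code: str, cursor_position: int) -> str: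
--     """Extract the word currently being typed (single forward pass)."""
--     if cursor_position < 0 or cursor_position > len(code):
--         return ""
--     start = 0
--     for i in range(cursor_position):
--         ch = code[i]
--         if not (ch.isalnum() or ch in '_.'):
--             start = i + 1
--     return code[start:cursor_position].lower()
-- ===== Notes on version B (the rewrite author's own statement) =====
-- stated objective: alternative
-- what changed: Replaces A's backward while-loop (decrementing start while the preceding char is a word char) with a single forward pass over the prefix that records the position after the last non-word character.
import Mathlib
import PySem

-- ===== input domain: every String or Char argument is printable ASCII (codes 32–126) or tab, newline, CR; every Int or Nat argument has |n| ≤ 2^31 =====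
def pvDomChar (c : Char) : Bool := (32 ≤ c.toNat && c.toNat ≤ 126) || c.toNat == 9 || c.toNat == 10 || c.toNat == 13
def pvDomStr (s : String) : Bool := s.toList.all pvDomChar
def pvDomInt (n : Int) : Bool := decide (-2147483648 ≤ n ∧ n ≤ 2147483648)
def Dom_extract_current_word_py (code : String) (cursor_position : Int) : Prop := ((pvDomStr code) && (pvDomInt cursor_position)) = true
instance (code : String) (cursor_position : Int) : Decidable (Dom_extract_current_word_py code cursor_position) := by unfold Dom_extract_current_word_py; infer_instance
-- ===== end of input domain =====

-- B replaces A's backward while-loop with a single forward pass remembering the last word boundary; objective: alternative (same cost, different traversal).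

-- ===== PORT A =====
-- ch.isalnum() or ch in '_.'  ('in' on a 1-char string is membership)
def pvIsWord (c : Char) : Bool := PySem.Chars.isalnum c || c = '_' || c = '.'

-- the backward while-loop of A: start -= 1 while the char before start is a word char
def pvAStart (l : List Char) (start : Int) : Int :=
  if h : 0 < start ∧ start ≤ (l.length : Int) ∧ pvIsWord (PySem.List.pyGetD l (start - 1) ' ') = true then
    pvAStart l (start - 1)
  else start
termination_by start.toNat
decreasing_by omega

def extract_current_word_py (code : String) (cursor_position : Int) : String :=
  if code.toList.isEmpty || decide ((code.toList.length : Int) < cursor_position) then ""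
  else
    let cp := min cursor_position (code.toList.length : Int)
    let start := pvAStart code.toList cp
    String.ofList (PySem.Chars.lower (PySem.List.slice code.toList (some start) (some cp)))

-- ===== PORT B =====
-- forward fold of Source B: start = i+1 at every non-word char of code[:cursor_position]
def pvBStart (l : List Char) (cursor_position : Int) : Int :=
  (PySem.List.pyRange 0 cursor_position 1).foldl
    (fun st i => if !(pvIsWord (PySem.List.pyGetD l i ' ')) then i + 1 else st) 0

def extract_current_word_py_alt (code : String) (cursor_position : Int) : String :=
  if decide (cursor_position < 0) || decide ((code.toList.length : Int) < cursor_position) then ""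
  else
    let start := pvBStart code.toList cursor_position
    String.ofList (PySem.Chars.lower
      (PySem.List.slice code.toList (some start) (some cursor_position)))

-- ===== PRECONDITION & SPEC =====
def Spec_extract_current_word_py (code : String) (cursor_position : Int) (out : String) : Prop := out = extract_current_word_py_alt code cursor_position
instance (code : String) (cursor_position : Int) (out : String) : Decidable (Spec_extract_current_word_py code cursor_position out) := by unfold Spec_extract_current_word_py; infer_instance

-- ===== CLAIM (what is proved, stated in full; the proofs are below) =====
def Claim_equal_extract_current_word_py : Prop := ∀ (code : String) (cursor_position : Int), Dom_extract_current_word_py code cursor_position → Spec_extract_current_word_py code cursor_position (extract_current_word_py code cursor_position)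

-- ===== LEMMAS AND PROOFS =====

theorem pvAStart_neg (l : List Char) (c : Int) (h : c ≤ 0) : pvAStart l c = c := by
  rw [pvAStart, dif_neg]
  rintro ⟨h1, -, -⟩
  omega

theorem pvBStart_zero (l : List Char) : pvBStart l 0 = 0 := by
  simp [pvBStart, PySem.List.pyRange_one_eq_nil]

theorem start_eq (l : List Char) : ∀ n : Nat, n ≤ l.length →
    pvAStart l (n : Int) = pvBStart l (n : Int) := by
  intro n
  induction n with
  | zero => intro _; simp [pvAStart_neg l 0 le_rfl, pvBStart_zero]
  | succ n ih =>
    intro hle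
    have hcast : ((n + 1 : Nat) : Int) = (n : Int) + 1 := by push_cast; ring
    rw [hcast]
    have hrange : PySem.List.pyRange 0 ((n : Int) + 1) 1
        = PySem.List.pyRange 0 (n : Int) 1 ++ [(n : Int)] := by
      simpa using PySem.List.pyRange_one_succ_right (a := 0) (b := (n : Int)) (by positivity)
    have hB : pvBStart l ((n : Int) + 1)
        = if !(pvIsWord (PySem.List.pyGetD l (n : Int) ' ')) then (n : Int) + 1
          else pvBStart l (n : Int) := by
      simp only [pvBStart, hrange, List.foldl_append, List.foldl_cons, List.foldl_nil]
    have hidx : ((n : Int) + 1 - 1) = (n : Int) := by ring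
    rw [pvAStart]
    by_cases hw : pvIsWord (PySem.List.pyGetD l (n : Int) ' ') = true
    · rw [dif_pos ⟨by positivity, by exact_mod_cast hle, by rw [hidx]; exact hw⟩]
      rw [hidx, ih (by omega), hB]
      simp only [PySem.List.pyGetD_natCast, List.getD] at hw
      simp [hw]
    · rw [dif_neg (by rw [hidx]; tauto), hB]
      simp only [Bool.not_eq_true] at hw
      simp only [PySem.List.pyGetD_natCast, List.getD] at hw
      simp [hw]

theorem slice_self_nil (l : List Char) (c : Int) :
    PySem.List.slice l (some c) (some c) = ([] : List Char) := by
  apply List.eq_nil_of_length_eq_zero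
  rw [PySem.List.length_slice]
  omega

-- ===== VERDICT (by name: the statement is the Claim_ definition above) =====
theorem extract_current_word_py_spec : Claim_equal_extract_current_word_py := by
  intro code cp _
  unfold Spec_extract_current_word_py extract_current_word_py extract_current_word_py_alt
  set l := code.toList with hl
  by_cases hemp : l.isEmpty
  · have h0 : l.length = 0 := by simpa [List.isEmpty_iff_length_eq_zero] using hemp
    simp only [hemp, Bool.true_or, if_pos]
    by_cases hc : cp < 0 ∨ (l.length : Int) < cp
    · rw [if_pos (by rcases hc with h | h <;> simp [h])]
    · push Not at hc
      have hcp : cp = 0 := by omega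
      subst hcp
      rw [if_neg (by simp)]
      have hln : l = [] := List.isEmpty_iff.mp hemp
      simp [pvBStart_zero, hln, PySem.List.slice, PySem.Chars.lower]
  · simp only [hemp, Bool.false_or]
    by_cases hbig : (l.length : Int) < cp
    · simp [hbig]
    · rw [if_neg (by simp [hbig])]
      by_cases hneg : cp < 0
      · rw [if_pos (by simp [hneg])]
        have hmin : min cp (l.length : Int) = cp := by omega
        rw [hmin, pvAStart_neg l cp (by omega), slice_self_nil]
        simp [PySem.Chars.lower]
      · rw [if_neg (by simp [hneg, hbig])]
        have hmin : min cp (l.length : Int) = cp := by omega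
        rw [hmin]
        obtain ⟨n, rfl⟩ : ∃ n : Nat, cp = (n : Int) := ⟨cp.toNat, by omega⟩
        rw [start_eq l n (by exact_mod_cast not_lt.mp hbig)]
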